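-- pv_equiv track=rewrite | github.com/albertoiur/Codility | chocolatesByNumbers.py | solution
-- ===== SOURCE A (Python) =====
-- class deque():
--     def __init__(self):
--         self.vector = []
--
--     def addFront(self,item):
--         self.vector.insert(0,item)
--
--     def addRear(self,item):
--         self.vector.append(item)
--
--     def removeFront(self):
--         return self.vector.pop(0)
--
--     def removeRear(self):
--         return self.vector.pop()
--
--     def removeFrontnTimesAddRear(self,n):
--         for i in range(n):
--             x = self.removeFront()
--             self.addRear(x)
--
--     def updateFront(self,x):
--         self.vector[0] = x
--
--
--     def isempty(self):
--         return self.vector == []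
--
--     def size(self):
--         return len(self.vector)
--
--     def mostra_deque(self):
--         return self.vector
--
--     def mostra_front(self):
--         return self.vector[0]
--
--     def criar_fila(self,lista):
--         self.vector.extend(lista)
--
-- def solution(N, M):
--     conta = 0
--     caixa_chocolates = deque()
--
--     A = [1] * N
--
--     caixa_chocolates.criar_fila(A)
--
--     while caixa_chocolates.mostra_front() != 0:
--         caixa_chocolates.updateFront(0)
--         conta += 1
--         caixa_chocolates.removeFrontnTimesAddRear(M)
--
--     return conta
-- ===== SOURCE B (Python) =====
-- def solution(N, M):
--     # Number of chocolates eaten = N / gcd(N, M), via Euclid's algorithm.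
--     a, b = N, abs(M)
--     while b:
--         a, b = b, a % b
--     return N // a
-- ===== Notes on version B (the rewrite author's own statement) =====
-- stated objective: faster
-- what changed: Replaces the O(N*M/gcd) deque simulation (rotate a list of N chocolates M times per bite) with Euclid's algorithm: the answer is N // gcd(N, M).
-- intended difference: For negative step M not divisible by N, A's rotation loop range(M) is empty so A accidentally returns 1, while B returns N//gcd(N,M), the number of distinct chocolates actually reachable stepping |M| around the circle, which is the intended count. — e.g. on solution(4, -1): A returns 1, B returns 4
import Mathlib
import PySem

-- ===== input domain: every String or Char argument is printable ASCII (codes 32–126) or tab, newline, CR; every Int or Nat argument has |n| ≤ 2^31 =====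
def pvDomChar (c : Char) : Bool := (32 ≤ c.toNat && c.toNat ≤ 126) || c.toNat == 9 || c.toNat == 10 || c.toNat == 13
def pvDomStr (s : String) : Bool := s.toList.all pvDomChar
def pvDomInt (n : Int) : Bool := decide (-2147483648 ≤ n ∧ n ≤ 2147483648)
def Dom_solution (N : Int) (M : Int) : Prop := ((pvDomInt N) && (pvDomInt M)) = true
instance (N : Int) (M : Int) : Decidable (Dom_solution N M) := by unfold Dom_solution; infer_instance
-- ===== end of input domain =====

-- B replaces A's O(N*M/gcd) deque simulation by Euclid's algorithm (answer = N // gcd(N, M)).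
-- ===== PORT A =====
-- one removeFront-then-addRear step of A's deque
def pyRotateStep (w : List Int) : List Int :=
  match w with
  | [] => []
  | x :: r => r ++ [x]

-- removeFrontnTimesAddRear(M): 'for i in range(M): ...'
def pyRotate (v : List Int) (M : Int) : List Int :=
  (PySem.List.pyRange 0 M 1).foldl (fun w _ => pyRotateStep w) v

-- mostra_front (self.vector[0]; Pre_ keeps the vector nonempty, so the [] case is unreachable)
def pyFront (v : List Int) : Int :=
  match v with
  | [] => 0
  | x :: _ => x

-- updateFront(0) (self.vector[0] = 0)
def pyZeroHead (v : List Int) : List Int :=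
  match v with
  | [] => []
  | _ :: r => (0:Int) :: r

-- A's while loop; fuel N+1 merely makes it total (the loop zeroes one of the N ones per pass)
def loopA : Nat → List Int → Int → Int → Int
  | 0, _, conta, _ => conta
  | fuel+1, v, conta, M =>
    if pyFront v ≠ 0 then
      loopA fuel (pyRotate (pyZeroHead v) M) (conta + 1) M
    else conta

def solution (N : Int) (M : Int) : Int :=
  loopA (N.toNat + 1) (List.replicate N.toNat (1:Int)) 0 M

-- ===== PORT B =====
-- Source B's Euclid loop: a, b = N, abs(M); while b: a, b = b, a % b
def euclidLoop (a b : Int) : Int :=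
  if h : b ≠ 0 then euclidLoop b (PySem.Int.mod a b) else a
termination_by b.natAbs
decreasing_by
  rcases lt_or_gt_of_ne h with hb | hb
  · have h1 := PySem.Int.mod_neg_bounds a hb
    omega
  · have h1 := PySem.Int.mod_nonneg a hb
    have h2 := PySem.Int.mod_lt a hb
    omega

def solution_alt (N : Int) (M : Int) : Int :=
  PySem.Int.floordiv N (euclidLoop N |M|)

-- ===== PRECONDITION & SPEC =====
-- Pre_ excludes N ≤ 0, where A's 'mostra_front' indexes an empty list and raises IndexError.
def Pre_solution (N : Int) (M : Int) : Prop := 1 ≤ N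
instance (N : Int) (M : Int) : Decidable (Pre_solution N M) := by unfold Pre_solution; infer_instance
def pvWitness_solution : Int × Int := (6, 4)

-- For negative M not divisible by N, A's 'range(M)' rotation loop is empty so A accidentally
-- returns 1; B returns N//gcd(N,M), the number of distinct chocolates reachable stepping |M|
-- around the circle, which is the intended count.
def D_solution (N : Int) (M : Int) : Prop := M < 0 ∧ ¬ (N ∣ M)
instance (N : Int) (M : Int) : Decidable (D_solution N M) := by unfold D_solution; infer_instance

def Spec_solution (N : Int) (M : Int) (out : Int) : Prop := ¬ D_solution N M → out = solution_alt N M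
instance (N : Int) (M : Int) (out : Int) : Decidable (Spec_solution N M out) := by unfold Spec_solution; infer_instance

def pvDiffWitness_solution : Int × Int := (4, -1)
def pvDiffWitnessOut_solution : Int × Int := (1, 4)

-- ===== CLAIM (what is proved, stated in full; the proofs are below) =====
def Claim_unchanged_solution : Prop := ∀ (N : Int) (M : Int), Dom_solution N M → Pre_solution N M → Spec_solution N M (solution N M)
def Claim_changed_solution : Prop := Dom_solution (pvDiffWitness_solution.1) (pvDiffWitness_solution.2) ∧ Pre_solution (pvDiffWitness_solution.1) (pvDiffWitness_solution.2) ∧ D_solution (pvDiffWitness_solution.1) (pvDiffWitness_solution.2) ∧ solution (pvDiffWitness_solution.1) (pvDiffWitness_solution.2) = pvDiffWitnessOut_solution.1 ∧ solution_alt (pvDiffWitness_solution.1) (pvDiffWitness_solution.2) = pvDiffWitnessOut_solution.2 ∧ pvDiffWitnessOut_solution.1 ≠ pvDiffWitnessOut_solution.2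
def Claim_exact_solution : Prop := ∀ (N : Int) (M : Int), Dom_solution N M → Pre_solution N M → D_solution N M → solution N M ≠ solution_alt N M

-- ===== LEMMAS AND PROOFS =====

-- the marking vector: after k bites, original position j is eaten iff j ≡ i*M (mod N) for some i < k
def markVec (n m k : Nat) : List Int :=
  (List.range n).map (fun j => if ∃ i < k, i * m % n = j then (0:Int) else 1)

-- B's Euclid loop computes the gcd
theorem euclidLoop_eq_gcd_aux (k : Nat) : ∀ (a b : Int), b.natAbs ≤ k → 0 ≤ b → 0 < a →
    euclidLoop a b = (Int.gcd a b : Int) := by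
  induction k with
  | zero =>
    intro a b hk hb ha
    have hb0 : b = 0 := by omega
    rw [euclidLoop]
    simp [hb0, Int.gcd_zero_right, Int.natAbs_of_nonneg (le_of_lt ha)]
  | succ k ih =>
    intro a b hk hb ha
    rw [euclidLoop]
    by_cases hb0 : b = 0
    · simp [hb0, Int.gcd_zero_right, Int.natAbs_of_nonneg (le_of_lt ha)]
    · have hbpos : 0 < b := by omega
      simp only [hb0, ne_eq, not_false_eq_true, dite_true]
      rw [PySem.Int.mod_eq_emod_of_pos hbpos]
      have h1 : 0 ≤ a % b := Int.emod_nonneg a hb0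
      have h2 : a % b < b := Int.emod_lt_of_pos a hbpos
      rw [ih b (a % b) (by omega) h1 hbpos]
      congr 1
      conv_lhs => rw [Int.emod_def a b]
      rw [show a - b * (a / b) = a - a / b * b by ring]
      rw [Int.gcd_sub_mul_right_right b a (a / b), Int.gcd_comm]

theorem euclidLoop_eq_gcd (b a : Int) (hb : 0 ≤ b) (ha : 0 < a) :
    euclidLoop a b = (Int.gcd a b : Int) :=
  euclidLoop_eq_gcd_aux b.natAbs a b le_rfl hb ha

theorem markVec_length (n m k : Nat) : (markVec n m k).length = n := by
  simp [markVec]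

theorem markVec_zero (n m : Nat) : markVec n m 0 = List.replicate n (1:Int) := by
  simp [markVec, List.eq_replicate_iff]

theorem markVec_succ (n m k : Nat) :
    markVec n m (k+1) = (markVec n m k).set (k * m % n) 0 := by
  apply List.ext_getElem
  · simp [markVec]
  · intro j h1 h2
    simp only [markVec, List.length_map, List.length_range] at h1
    simp only [markVec, List.getElem_set, List.getElem_map, List.getElem_range]
    by_cases hkj : k * m % n = j
    · rw [if_pos hkj, if_pos ⟨k, Nat.lt_succ_self k, hkj⟩]
    · rw [if_neg hkj]
      congr 1
      simp only [eq_iff_iff]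
      constructor
      · rintro ⟨i, hi, he⟩
        rcases Nat.lt_succ_iff_lt_or_eq.mp hi with h | h
        · exact ⟨i, h, he⟩
        · exact absurd (h ▸ he) hkj
      · rintro ⟨i, hi, he⟩
        exact ⟨i, Nat.lt_succ_of_lt hi, he⟩

theorem foldl_rotStep {α : Type} (l : List α) (v : List Int) (hv : v ≠ []) :
    l.foldl (fun w _ => pyRotateStep w) v = v.rotate l.length := by
  induction l generalizing v with
  | nil => simp
  | cons a l ih =>
    obtain ⟨x, r, rfl⟩ : ∃ x r, v = x :: r := by
      cases v with
      | nil => exact absurd rfl hv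
      | cons x r => exact ⟨x, r, rfl⟩
    have hstep : pyRotateStep (x :: r) = r ++ [x] := rfl
    have hne : r ++ [x] ≠ [] := by simp
    calc ((a :: l).foldl (fun w _ => pyRotateStep w) (x :: r))
        = l.foldl (fun w _ => pyRotateStep w) (r ++ [x]) := by simp [hstep]
      _ = (r ++ [x]).rotate l.length := ih _ hne
      _ = ((x :: r).rotate 1).rotate l.length := by
          rw [show (x :: r).rotate 1 = (r ++ [x]).rotate 0 from List.rotate_cons_succ r x 0]
          simp
      _ = (x :: r).rotate (a :: l).length := by
          rw [List.rotate_rotate]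
          simp [Nat.add_comm]

theorem pyRotate_eq (v : List Int) (hv : v ≠ []) (M : Int) :
    pyRotate v M = v.rotate M.toNat := by
  unfold pyRotate
  rw [foldl_rotStep _ v hv, PySem.List.length_pyRange_one]
  norm_num

-- zeroing the head of a rotation = zeroing the rotated-to position, then rotating
theorem set_zero_rotate (w : List Int) (r : Nat) (hw : w ≠ []) :
    (w.rotate r).set 0 0 = (w.set (r % w.length) 0).rotate r := by
  have hlen : 0 < w.length := List.length_pos_of_ne_nil hw
  apply List.ext_getElem
  · simp
  · intro j h1 h2
    have hj : j < w.length := by simpa using h1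
    rw [List.getElem_set]
    rw [List.getElem_rotate]
    have hjr : (j + r) % w.length < w.length := Nat.mod_lt _ hlen
    rw [List.getElem_rotate]
    rw [List.getElem_set]
    simp only [List.length_set]
    have hiff : 0 = j ↔ r % w.length = (j + r) % w.length := by
      constructor
      · rintro rfl; simp [Nat.add_comm]
      · intro h
        by_contra hj0
        have hjpos : 0 < j := Nat.pos_of_ne_zero (fun hh => hj0 hh.symm)
        have h3 : (j + r) % w.length = (j + r % w.length) % w.length := by
          conv_lhs => rw [Nat.add_mod]
          conv_rhs => rw [Nat.add_mod]
          simp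
        have hb : r % w.length < w.length := Nat.mod_lt _ hlen
        rw [h3] at h
        rcases Nat.lt_or_ge (j + r % w.length) w.length with hc | hc
        · rw [Nat.mod_eq_of_lt hc] at h; omega
        · have hc2 : j + r % w.length < 2 * w.length := by omega
          have : (j + r % w.length) % w.length = j + r % w.length - w.length := by
            rw [Nat.mod_eq_sub_mod (by omega), Nat.mod_eq_of_lt (by omega)]
          rw [this] at h
          omega
    by_cases h0 : 0 = j
    · rw [if_pos h0, if_pos (hiff.mp h0)]
    · rw [if_neg h0, if_neg (fun hh => h0 (hiff.mpr hh))]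

-- divisibility characterisation: n ∣ d*m ↔ (n / gcd n m) ∣ d
theorem dvd_mul_iff_k0_dvd (n m : Nat) (hn : 0 < n) (d : Nat) :
    n ∣ d * m ↔ (n / Nat.gcd n m) ∣ d := by
  set g := Nat.gcd n m with hgdef
  have hg : 0 < g := Nat.gcd_pos_of_pos_left m hn
  have hco : Nat.Coprime (n / g) (m / g) := Nat.coprime_div_gcd_div_gcd hg
  obtain ⟨n', hn'⟩ : g ∣ n := Nat.gcd_dvd_left n m
  obtain ⟨m', hm'⟩ : g ∣ m := Nat.gcd_dvd_right n m
  have hdivn : n / g = n' := by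
    nth_rewrite 1 [hn']; exact Nat.mul_div_cancel_left n' hg
  have hdivm : m / g = m' := by
    nth_rewrite 1 [hm']; exact Nat.mul_div_cancel_left m' hg
  rw [hdivn]
  rw [hdivn, hdivm] at hco
  constructor
  · intro h
    rw [hn', hm'] at h
    have h2 : g * n' ∣ g * (d * m') := by
      rw [show g * (d * m') = d * (g * m') by ring]
      exact h
    have h3 : n' ∣ d * m' := (mul_dvd_mul_iff_left (by omega : g ≠ 0)).mp h2
    exact hco.dvd_of_dvd_mul_right h3
  · rintro ⟨t, rfl⟩
    rw [hn', hm']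
    exact ⟨t * m', by ring⟩

theorem k0_pos (n m : Nat) (hn : 0 < n) : 0 < n / Nat.gcd n m :=
  Nat.div_pos (Nat.le_of_dvd hn (Nat.gcd_dvd_left n m)) (Nat.gcd_pos_of_pos_left m hn)

theorem front_cond (n m k : Nat) (hn : 0 < n) (hk : k ≤ n / Nat.gcd n m) :
    (∃ i < k, i * m % n = k * m % n) ↔ k = n / Nat.gcd n m := by
  constructor
  · rintro ⟨i, hik, he⟩
    have hmod : i * m ≡ k * m [MOD n] := he
    have hle : i * m ≤ k * m := Nat.mul_le_mul_right m (Nat.le_of_lt hik)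
    have hdvd : n ∣ k * m - i * m := (Nat.modEq_iff_dvd' hle).mp hmod
    rw [← Nat.sub_mul] at hdvd
    have h2 : (n / Nat.gcd n m) ∣ (k - i) := (dvd_mul_iff_k0_dvd n m hn _).mp hdvd
    have h3 : n / Nat.gcd n m ≤ k - i := Nat.le_of_dvd (by omega) h2
    omega
  · rintro rfl
    refine ⟨0, k0_pos n m hn, ?_⟩
    have hdvd : n ∣ (n / Nat.gcd n m) * m := (dvd_mul_iff_k0_dvd n m hn _).mpr dvd_rfl
    simp [Nat.eq_zero_of_dvd_of_lt, (Nat.mod_eq_zero_of_dvd hdvd)]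

theorem pyFront_eq_getElem (v : List Int) (h : v ≠ []) :
    pyFront v = v[0]'(List.length_pos_of_ne_nil h) := by
  cases v with
  | nil => exact absurd rfl h
  | cons x r => rfl

theorem pyZeroHead_eq_set (v : List Int) : pyZeroHead v = v.set 0 0 := by
  cases v <;> rfl

-- the loop invariant: from state k (vector = markVec k rotated by k*m) the loop returns k0
theorem loopA_inv (n m : Nat) (M : Int) (hn : 0 < n) (hm : m = M.toNat) :
    ∀ (fuel k : Nat), k ≤ n / Nat.gcd n m → n / Nat.gcd n m ≤ k + fuel →
      loopA fuel ((markVec n m k).rotate (k * m)) (k : Int) M = ((n / Nat.gcd n m : Nat) : Int) := by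
  intro fuel
  induction fuel with
  | zero =>
    intro k h1 h2
    have hk : k = n / Nat.gcd n m := by omega
    simp [loopA, hk]
  | succ fuel ih =>
    intro k h1 h2
    have hlen : ((markVec n m k).rotate (k * m)).length = n := by
      simp [markVec_length]
    have hne : (markVec n m k).rotate (k * m) ≠ [] := by
      apply List.ne_nil_of_length_pos; omega
    have hidx : (0 + k * m) % (markVec n m k).length < (markVec n m k).length := by
      rw [markVec_length]; exact Nat.mod_lt _ hn
    have hfront : pyFront ((markVec n m k).rotate (k * m)) =
        (if ∃ i < k, i * m % n = k * m % n then (0:Int) else 1) := by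
      rw [pyFront_eq_getElem _ hne, List.getElem_rotate]
      simp only [markVec, List.getElem_map, List.getElem_range, List.length_map,
        List.length_range, Nat.zero_add]
    by_cases hkk : k = n / Nat.gcd n m
    · have hcond : ∃ i < k, i * m % n = k * m % n :=
        (front_cond n m k hn h1).mpr hkk
      simp only [loopA, hfront, if_pos hcond]
      simp [hkk]
    · have hklt : k < n / Nat.gcd n m := by omega
      have hcond : ¬ ∃ i < k, i * m % n = k * m % n := by
        intro hc; exact hkk ((front_cond n m k hn h1).mp hc)
      have hstate : pyRotate (pyZeroHead ((markVec n m k).rotate (k * m))) M =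
          (markVec n m (k + 1)).rotate ((k + 1) * m) := by
        rw [pyZeroHead_eq_set, set_zero_rotate _ _ (by
          apply List.ne_nil_of_length_pos; rw [markVec_length]; omega)]
        rw [markVec_length, ← markVec_succ]
        rw [pyRotate_eq _ (by
          apply List.ne_nil_of_length_pos
          simp [markVec_length]; omega) M]
        rw [List.rotate_rotate, ← hm]
        congr 1
        ring
      simp only [loopA, hfront, if_neg hcond, ne_eq, one_ne_zero, not_false_eq_true,
        if_pos, ite_true]
      rw [hstate]
      have hcast : (k : Int) + 1 = ((k + 1 : Nat) : Int) := by push_cast; ring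
      rw [hcast]
      exact ih (k + 1) (by omega) (by omega)

-- A computes N / gcd(N, max(M,0))  (rotation by negative M is a no-op, like rotation by 0)
theorem solution_val (N M : Int) (h : 1 ≤ N) :
    solution N M = ((N.toNat / Nat.gcd N.toNat M.toNat : Nat) : Int) := by
  have hn : 0 < N.toNat := by omega
  unfold solution
  have h0 : List.replicate N.toNat (1:Int) = (markVec N.toNat M.toNat 0).rotate (0 * M.toNat) := by
    rw [markVec_zero]; simp
  rw [h0]
  have hfin := loopA_inv N.toNat M.toNat M hn rfl (N.toNat + 1) 0
    (Nat.zero_le _) (by have := Nat.div_le_self N.toNat (Nat.gcd N.toNat M.toNat); omega)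
  simpa using hfin

-- B computes N / gcd(N, |M|)
theorem solution_alt_val (N M : Int) (h : 1 ≤ N) :
    solution_alt N M = ((N.toNat / Nat.gcd N.toNat M.natAbs : Nat) : Int) := by
  obtain ⟨n, rfl⟩ : ∃ n : Nat, N = (n : Int) := ⟨N.toNat, by omega⟩
  unfold solution_alt
  rw [euclidLoop_eq_gcd |M| _ (abs_nonneg M) (by omega)]
  have hg : Int.gcd (n : Int) |M| = Nat.gcd n M.natAbs := by
    simp [Int.gcd, Int.natAbs_abs]
  rw [hg]
  simp only [Int.toNat_natCast]
  rw [PySem.Int.floordiv_natCast]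

-- ===== VERDICT (by name: the statement is the Claim_ definition above) =====
theorem solution_spec : Claim_unchanged_solution := by
  intro N M hd hp
  unfold Spec_solution
  intro hnd
  have h1 : (1:Int) ≤ N := hp
  rw [solution_val N M h1, solution_alt_val N M h1]
  unfold D_solution at hnd
  push_neg at hnd
  by_cases hM : 0 ≤ M
  · have ht : M.toNat = M.natAbs := by omega
    rw [ht]
  · have hdvd : N ∣ M := hnd (by omega)
    have ht : M.toNat = 0 := by omega
    have hna : N.toNat ∣ M.natAbs := by
      have h2 := Int.natAbs_dvd_natAbs.mpr hdvd
      have h3 : N.natAbs = N.toNat := by omega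
      rw [← h3]; exact h2
    rw [ht, Nat.gcd_zero_right, Nat.gcd_eq_left hna]

theorem solution_changed : Claim_changed_solution := by
  unfold Claim_changed_solution
  refine ⟨by decide, by decide, by decide, by decide, ?_, by decide⟩
  show solution_alt 4 (-1) = 4
  have hmod : PySem.Int.mod 4 1 = 0 := by decide
  have h1 : euclidLoop (4:Int) 1 = 1 := by
    rw [euclidLoop, dif_pos (by decide : (1:Int) ≠ 0), hmod,
      euclidLoop, dif_neg (by decide : ¬((0:Int) ≠ 0))]
  have habs : |(-1 : Int)| = 1 := by decide
  unfold solution_alt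
  rw [habs, h1]
  decide

theorem solution_tight : Claim_exact_solution := by
  intro N M hd hp hD
  obtain ⟨hM, hndvd⟩ := hD
  have h1 : (1:Int) ≤ N := hp
  rw [solution_val N M h1, solution_alt_val N M h1]
  have ht : M.toNat = 0 := by omega
  rw [ht, Nat.gcd_zero_right, Nat.div_self (by omega : 0 < N.toNat)]
  have hgdvd : Nat.gcd N.toNat M.natAbs ∣ N.toNat := Nat.gcd_dvd_left _ _
  have hgpos : 0 < Nat.gcd N.toNat M.natAbs := Nat.gcd_pos_of_pos_left _ (by omega)
  have hgne : Nat.gcd N.toNat M.natAbs ≠ N.toNat := by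
    intro h
    apply hndvd
    have h2 : N.toNat ∣ M.natAbs := by
      rw [← h]; exact Nat.gcd_dvd_right _ _
    have h3 : N.natAbs ∣ M.natAbs := by
      have hNn : N.natAbs = N.toNat := by omega
      rw [hNn]; exact h2
    exact Int.natAbs_dvd_natAbs.mp h3
  have hq : N.toNat / Nat.gcd N.toNat M.natAbs * Nat.gcd N.toNat M.natAbs = N.toNat :=
    Nat.div_mul_cancel hgdvd
  have hqpos : 0 < N.toNat / Nat.gcd N.toNat M.natAbs :=
    Nat.div_pos (Nat.le_of_dvd (by omega) hgdvd) hgpos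
  have hqne : N.toNat / Nat.gcd N.toNat M.natAbs ≠ 1 := by
    intro h; rw [h] at hq; omega
  have h2 : 2 ≤ N.toNat / Nat.gcd N.toNat M.natAbs := by omega
  intro hc
  have : (1 : Nat) = N.toNat / Nat.gcd N.toNat M.natAbs := by exact_mod_cast hc
  omega
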